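-- pv_equiv track=rewrite | github.com/achobgood/wxops | src/wxcli/migration/transform/analyzers/selective_call_handling.py | _scopes_differ
-- ===== SOURCE A (Python) =====
-- def _scopes_differ(scopes: list[set[str]]) -> bool:
--     if len(scopes) < 2:
--         return False
--     # Any pair with non-empty symmetric difference → scopes differ.
--     for i in range(len(scopes)):
--         for j in range(i + 1, len(scopes)):
--             if scopes[i] ^ scopes[j]:
--                 return True
--     return False
-- ===== SOURCE B (Python) =====
-- def _scopes_differ(scopes: list[set[str]]) -> bool:
--     if not scopes:
--         return False
--     first = scopes[0]
--     return any(s != first for s in scopes[1:])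
-- ===== Notes on version B (the rewrite author's own statement) =====
-- stated objective: simpler
-- what changed: Instead of testing every pair's symmetric difference in quadratically many comparisons, B compares each remaining set once against the first set (equivalence of set equality makes pairwise agreement follow from agreement with a fixed representative).
import Mathlib
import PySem

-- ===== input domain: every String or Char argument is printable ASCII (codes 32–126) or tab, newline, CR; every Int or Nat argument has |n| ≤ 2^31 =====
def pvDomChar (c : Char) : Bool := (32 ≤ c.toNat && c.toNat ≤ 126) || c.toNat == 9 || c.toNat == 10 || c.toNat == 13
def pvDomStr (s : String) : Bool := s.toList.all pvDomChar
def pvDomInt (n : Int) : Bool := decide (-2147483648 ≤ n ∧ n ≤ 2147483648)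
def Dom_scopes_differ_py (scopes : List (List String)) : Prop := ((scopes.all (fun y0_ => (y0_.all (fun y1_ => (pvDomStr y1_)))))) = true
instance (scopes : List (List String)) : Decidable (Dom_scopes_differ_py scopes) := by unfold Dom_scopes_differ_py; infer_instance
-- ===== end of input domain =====

-- B replaces A's quadratic all-pairs symmetric-difference test by one linear pass comparing
-- each remaining set to the first (objective: simpler).

-- ===== PORT A =====
-- A: guard len < 2, then nested index loops with early return on a non-empty symmetric difference.
def scopes_differ_py (scopes : List (List String)) : Bool :=
  if scopes.length < 2 then false
  else
    (PySem.List.pyRange 0 scopes.length).any (fun i =>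
      (PySem.List.pyRange (i + 1) scopes.length).any (fun j =>
        !(PySem.Set.symmDiff (PySem.List.pyGetD scopes i []) (PySem.List.pyGetD scopes j [])).isEmpty))

-- ===== PORT B =====
-- B: empty → False; else any(s != first) over the tail.
def scopes_differ_py_alt (scopes : List (List String)) : Bool :=
  match scopes with
  | [] => false
  | first :: rest => rest.any (fun s => !(PySem.Set.equal s first))

-- ===== PRECONDITION & SPEC =====
def Spec_scopes_differ_py (scopes : List (List String)) (out : Bool) : Prop := out = scopes_differ_py_alt scopes
instance (scopes : List (List String)) (out : Bool) : Decidable (Spec_scopes_differ_py scopes out) := by unfold Spec_scopes_differ_py; infer_instance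

-- ===== CLAIM (what is proved, stated in full; the proofs are below) =====
def Claim_equal_scopes_differ_py : Prop := ∀ (scopes : List (List String)), Dom_scopes_differ_py scopes → Spec_scopes_differ_py scopes (scopes_differ_py scopes)

-- ===== LEMMAS AND PROOFS =====

-- the equivalence relation "same members" (Python set equality)
def pvEqv (a b : List String) : Prop := ∀ x, x ∈ a ↔ x ∈ b

theorem pvEqv_symmDiff (a b : List String) :
    ((!(PySem.Set.symmDiff a b).isEmpty) = true) ↔ ¬ pvEqv a b := by
  have h0 : PySem.Set.symmDiff a b = [] ↔ pvEqv a b := by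
    rw [List.eq_nil_iff_forall_not_mem]
    constructor
    · intro h x
      constructor
      · intro hx
        by_contra hb
        exact h x ((PySem.Set.mem_symmDiff a b x).2 (Or.inl ⟨hx, hb⟩))
      · intro hx
        by_contra hb
        exact h x ((PySem.Set.mem_symmDiff a b x).2 (Or.inr ⟨hx, hb⟩))
    · intro h y hy
      rcases (PySem.Set.mem_symmDiff a b y).1 hy with ⟨h1, h2⟩ | ⟨h1, h2⟩
      · exact h2 ((h y).1 h1)
      · exact h2 ((h y).2 h1)
  rw [Bool.not_eq_eq_eq_not, Bool.not_true, List.isEmpty_eq_false_iff]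
  exact not_congr h0

theorem pvEqv_equal (a b : List String) :
    ((!(PySem.Set.equal a b)) = true) ↔ ¬ pvEqv a b := by
  rw [Bool.not_eq_eq_eq_not, Bool.not_true, ← Bool.not_eq_true, PySem.Set.equal_iff]
  rfl

-- A is true iff some pair of positions carries sets with different members.
theorem pvA_iff (scopes : List (List String)) :
    scopes_differ_py scopes = true ↔
      ∃ (i j : ℕ) (hi : i < scopes.length) (hj : j < scopes.length),
        i < j ∧ ¬ pvEqv scopes[i] scopes[j] := by
  unfold scopes_differ_py
  split_ifs with hlen
  · simp only [false_iff]
    rintro ⟨i, j, hi, hj, hij, _⟩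
    omega
  · rw [List.any_eq_true]
    constructor
    · rintro ⟨i, hi, hinner⟩
      rw [List.any_eq_true] at hinner
      obtain ⟨j, hj, hf⟩ := hinner
      rw [PySem.List.mem_pyRange_one] at hi hj
      have hi0 : 0 ≤ i := hi.1
      have hj0 : 0 ≤ j := le_trans (by omega) hj.1
      obtain ⟨in', rfl⟩ : ∃ n : ℕ, i = (n : ℤ) := ⟨i.toNat, by omega⟩
      obtain ⟨jn', rfl⟩ : ∃ n : ℕ, j = (n : ℤ) := ⟨j.toNat, by omega⟩
      have hiL : in' < scopes.length := by exact_mod_cast hi.2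
      have hjL : jn' < scopes.length := by exact_mod_cast hj.2
      refine ⟨in', jn', hiL, hjL, by exact_mod_cast (by omega : (in' : ℤ) < jn'), ?_⟩
      rw [PySem.List.pyGetD_natCast, PySem.List.pyGetD_natCast,
        List.getD_eq_getElem _ _ hiL, List.getD_eq_getElem _ _ hjL] at hf
      exact (pvEqv_symmDiff _ _).1 hf
    · rintro ⟨i, j, hi, hj, hij, hne⟩
      refine ⟨(i : ℤ), ?_, ?_⟩
      · rw [PySem.List.mem_pyRange_one]
        constructor
        · exact_mod_cast Nat.zero_le i
        · exact_mod_cast hi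
      · rw [List.any_eq_true]
        refine ⟨(j : ℤ), ?_, ?_⟩
        · rw [PySem.List.mem_pyRange_one]
          constructor
          · exact_mod_cast hij
          · exact_mod_cast hj
        · rw [PySem.List.pyGetD_natCast, PySem.List.pyGetD_natCast,
            List.getD_eq_getElem _ _ hi, List.getD_eq_getElem _ _ hj]
          exact (pvEqv_symmDiff _ _).2 hne

theorem pvEqv_symm {a b : List String} (h : pvEqv a b) : pvEqv b a := fun x => (h x).symm
theorem pvEqv_trans {a b c : List String} (h1 : pvEqv a b) (h2 : pvEqv b c) : pvEqv a c :=
  fun x => (h1 x).trans (h2 x)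

-- the pair formulation is equivalent to Pairwise
theorem pvA_pairwise (scopes : List (List String)) :
    scopes_differ_py scopes = true ↔ ¬ scopes.Pairwise pvEqv := by
  rw [pvA_iff, List.pairwise_iff_getElem]
  push_neg
  constructor
  · rintro ⟨i, j, hi, hj, hij, h⟩; exact ⟨i, j, hi, hj, hij, h⟩
  · rintro ⟨i, j, hi, hj, hij, h⟩; exact ⟨i, j, hi, hj, hij, h⟩

theorem pvB_iff (first : List String) (rest : List (List String)) :
    scopes_differ_py_alt (first :: rest) = true ↔ ∃ s ∈ rest, ¬ pvEqv s first := by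
  unfold scopes_differ_py_alt
  rw [List.any_eq_true]
  constructor
  · rintro ⟨s, hs, h⟩; exact ⟨s, hs, (pvEqv_equal _ _).1 h⟩
  · rintro ⟨s, hs, h⟩; exact ⟨s, hs, (pvEqv_equal _ _).2 h⟩

-- ===== VERDICT (by name: the statement is the Claim_ definition above) =====
theorem scopes_differ_py_spec : Claim_equal_scopes_differ_py := by
  intro scopes _
  unfold Spec_scopes_differ_py
  cases scopes with
  | nil => rfl
  | cons first rest =>
    have key : scopes_differ_py (first :: rest) = true ↔
        scopes_differ_py_alt (first :: rest) = true := by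
      rw [pvA_pairwise, pvB_iff]
      constructor
      · intro h
        by_contra hc
        push_neg at hc
        apply h
        have hall : ∀ s ∈ rest, pvEqv first s := fun s hs => pvEqv_symm (hc s hs)
        exact List.Pairwise.cons hall
          (List.pairwise_of_forall_mem_list (fun a ha b hb =>
            pvEqv_trans (pvEqv_symm (hall a ha)) (hall b hb)))
      · rintro ⟨s, hs, hne⟩ hp
        rcases List.pairwise_cons.1 hp with ⟨hhead, _⟩
        exact hne (pvEqv_symm (hhead s hs))
    cases hA : scopes_differ_py (first :: rest) with
    | true => exact (key.1 hA).symm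
    | false =>
      cases hB : scopes_differ_py_alt (first :: rest) with
      | true => exact absurd (key.2 hB) (by simp [hA])
      | false => rfl
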